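-- pv_equiv track=rewrite | github.com/backyardbiomech/argus_gui | argus_gui/Argus.py | format_file_path_for_display
-- ===== SOURCE A (Python) =====
-- def format_file_path_for_display(file_path, max_length=70):
--     """
--     Format file path to show filename and truncate beginning if too long.
--     For example: /very/long/path/to/video.mp4 becomes ...path/to/video.mp4
--     """
--     if len(file_path) <= max_length:
--         return file_path
--
--     # Split the path and always keep the filename
--     parts = file_path.split('/')
--     filename = parts[-1]
--
--     # If just the filename is too long, return it as is
--     if len(filename) > max_length:
--         return filename
--
--     # Build path from the end, keeping as much as possible
--     result = filename
--     for i in range(len(parts) - 2, -1, -1):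
--         part = parts[i]
--         # Check if adding this part (plus separator and "...") would exceed limit
--         test_length = len("..." + part + "/" + result)
--         if test_length <= max_length:
--             result = part + "/" + result
--         else:
--             result = "..." + result
--             break
--
--     return result
-- ===== SOURCE B (Python) =====
-- def format_file_path_for_display(file_path, max_length=70):
--     if len(file_path) <= max_length:
--         return file_path
--     # Chop leading path components off the front until the display string fits.
--     remainder = file_path
--     while '/' in remainder and len('...' + remainder) > max_length:
--         remainder = remainder[remainder.index('/') + 1:]
--     if len(remainder) > max_length:
--         return remainder
--     return '...' + remainder
-- ===== Notes on version B (the rewrite author's own statement) =====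
-- stated objective: simpler
-- what changed: B drops A's split-into-parts list and its regrow-the-suffix-from-the-filename loop; it keeps one shrinking substring of the raw path and chops leading components off the front until the ellipsis-prefixed display string fits, deciding the bare-filename case after the loop instead of before it.
import Mathlib
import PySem

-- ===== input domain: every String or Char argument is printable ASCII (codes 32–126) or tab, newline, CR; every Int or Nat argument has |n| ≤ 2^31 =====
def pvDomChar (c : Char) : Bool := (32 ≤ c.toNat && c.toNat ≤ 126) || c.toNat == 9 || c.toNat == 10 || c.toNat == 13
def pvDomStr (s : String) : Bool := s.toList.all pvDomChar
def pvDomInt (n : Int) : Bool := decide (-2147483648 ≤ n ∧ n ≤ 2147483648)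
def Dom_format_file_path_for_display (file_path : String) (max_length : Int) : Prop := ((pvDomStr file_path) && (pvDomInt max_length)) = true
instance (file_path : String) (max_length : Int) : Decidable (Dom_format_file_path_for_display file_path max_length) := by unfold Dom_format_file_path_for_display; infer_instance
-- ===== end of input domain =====

-- B replaces A's split-into-parts + regrow-suffix-from-the-end loop by a single shrinking
-- substring: chop leading path components off the front until the display string fits
-- (objective: simpler; same return value on every input).

-- ===== PORT A =====
-- the 'for i in range(len(parts)-2, -1, -1)' loop with break; counter n+1 processes index i = n
def fmtA_loop (parts : List (List Char)) (max_length : Int) : Nat → List Char → List Char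
  | 0, result => result
  | n + 1, result =>
    let part := PySem.List.pyGetD parts (n : Int) []
    if PySem.Chars.len (['.', '.', '.'] ++ part ++ ['/'] ++ result) ≤ max_length then
      fmtA_loop parts max_length n (part ++ ['/'] ++ result)
    else
      ['.', '.', '.'] ++ result

def format_file_path_for_display (file_path : String) (max_length : Int) : String :=
  if PySem.Str.len file_path ≤ max_length then file_path
  else
    let parts := PySem.Chars.splitOn file_path.toList ['/']
    let filename := ((PySem.List.pyGet? parts (-1)).getD [])
    if max_length < PySem.Chars.len filename then String.ofList filename
    else String.ofList (fmtA_loop parts max_length (parts.length - 1) filename)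

-- ===== PORT B =====
-- termination of B's while loop: dropping past the first '/' strictly shrinks the string
lemma fmtB_drop_dec (r : List Char) (h : PySem.Chars.isIn ['/'] r = true) :
    (PySem.List.slice r (some (PySem.Chars.find r ['/'] + 1)) none).length < r.length := by
  have hinf : ['/'] <:+: r := (PySem.Chars.isIn_iff_infix _ _).mp h
  have h0 : 0 ≤ PySem.Chars.find r ['/'] := (PySem.Chars.find_nonneg_iff _ _).mpr hinf
  have hne : r ≠ [] := by
    rintro rfl
    simp at hinf
  have hlen : 0 < r.length := List.length_pos_of_ne_nil hne
  rw [PySem.List.slice_from r (by omega)]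
  have h1 : 1 ≤ (PySem.Chars.find r ['/'] + 1).toNat := by omega
  simp only [List.length_drop]
  omega

def fmtB_drop (max_length : Int) (remainder : List Char) : List Char :=
  if h : PySem.Chars.isIn ['/'] remainder = true ∧
      max_length < PySem.Chars.len (['.', '.', '.'] ++ remainder) then
    fmtB_drop max_length
      (PySem.List.slice remainder (some (PySem.Chars.find remainder ['/'] + 1)) none)
  else remainder
termination_by remainder.length
decreasing_by exact fmtB_drop_dec remainder h.1

def format_file_path_for_display_alt (file_path : String) (max_length : Int) : String :=
  if PySem.Str.len file_path ≤ max_length then file_path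
  else
    let remainder := fmtB_drop max_length file_path.toList
    if max_length < PySem.Chars.len remainder then String.ofList remainder
    else String.ofList (['.', '.', '.'] ++ remainder)

-- ===== PRECONDITION & SPEC =====
def Spec_format_file_path_for_display (file_path : String) (max_length : Int) (out : String) : Prop := out = format_file_path_for_display_alt file_path max_length
instance (file_path : String) (max_length : Int) (out : String) : Decidable (Spec_format_file_path_for_display file_path max_length out) := by unfold Spec_format_file_path_for_display; infer_instance

-- ===== CLAIM (what is proved, stated in full; the proofs are below) =====
def Claim_equal_format_file_path_for_display : Prop := ∀ (file_path : String) (max_length : Int), Dom_format_file_path_for_display file_path max_length → Spec_format_file_path_for_display file_path max_length (format_file_path_for_display file_path max_length)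

-- ===== LEMMAS AND PROOFS =====

-- reference split (proofs only): Python s.split(c) for a one-character separator
def pvSplit (c : Char) : List Char → List (List Char)
  | [] => [[]]
  | x :: xs =>
    if x = c then [] :: pvSplit c xs
    else
      match pvSplit c xs with
      | [] => [[x]]
      | p :: ps => (x :: p) :: ps

lemma pvSplit_ne_nil (c : Char) (s : List Char) : pvSplit c s ≠ [] := by
  cases s with
  | nil => simp [pvSplit]
  | cons x xs =>
    simp only [pvSplit]
    split <;> [skip; split] <;> simp

lemma splitOn_go_eq (c : Char) :
    ∀ (fuel : Nat) (l cur : List Char) (acc : List (List Char)), l.length ≤ fuel →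
      PySem.Chars.splitOn.go [c] fuel l cur acc =
        acc.reverse ++
          (match pvSplit c l with
           | [] => [cur.reverse]
           | p :: ps => (cur.reverse ++ p) :: ps) := by
  intro fuel
  induction fuel with
  | zero =>
    intro l cur acc hl
    have hnil : l = [] := List.eq_nil_of_length_eq_zero (Nat.le_zero.mp hl)
    subst hnil
    simp [PySem.Chars.splitOn.go, pvSplit]
  | succ fuel ih =>
    intro l cur acc hl
    cases l with
    | nil => simp [PySem.Chars.splitOn.go, pvSplit]
    | cons x rest =>
      rw [PySem.Chars.splitOn.go.eq_def]
      by_cases hx : x = c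
      · subst hx
        simp only [List.isPrefixOf, beq_self_eq_true, Bool.true_and, if_pos,
          List.length_singleton, List.drop_succ_cons, List.drop_zero]
        rw [ih rest [] (cur.reverse :: acc) (by simpa using Nat.lt_succ_iff.mp (by simpa using hl))]
        obtain ⟨p, ps, hps⟩ : ∃ p ps, pvSplit x rest = p :: ps := by
          cases h : pvSplit x rest with
          | nil => exact absurd h (pvSplit_ne_nil x rest)
          | cons p ps => exact ⟨p, ps, rfl⟩
        simp [pvSplit, hps]
      · have hpre : List.isPrefixOf [c] (x :: rest) = false := by
          simp [List.isPrefixOf]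
          exact fun h => absurd h.symm hx
        simp only [hpre]
        rw [if_neg (by simp)]
        rw [ih rest (x :: cur) acc (by simpa using Nat.lt_succ_iff.mp (by simpa using hl))]
        obtain ⟨p, ps, hps⟩ : ∃ p ps, pvSplit c rest = p :: ps := by
          cases h : pvSplit c rest with
          | nil => exact absurd h (pvSplit_ne_nil c rest)
          | cons p ps => exact ⟨p, ps, rfl⟩
        simp [pvSplit, hps, hx]

lemma splitOn_eq_pvSplit (c : Char) (s : List Char) :
    PySem.Chars.splitOn s [c] = pvSplit c s := by
  rw [PySem.Chars.splitOn]
  rw [splitOn_go_eq c (s.length + 1) s [] [] (by omega)]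
  obtain ⟨p, ps, hps⟩ : ∃ p ps, pvSplit c s = p :: ps := by
    cases h : pvSplit c s with
    | nil => exact absurd h (pvSplit_ne_nil c s)
    | cons p ps => exact ⟨p, ps, rfl⟩
  simp [hps]

lemma join_pvSplit (c : Char) (s : List Char) :
    PySem.Chars.join [c] (pvSplit c s) = s := by
  induction s with
  | nil => simp [pvSplit, PySem.Chars.join_singleton]
  | cons x xs ih =>
    obtain ⟨p, ps, hps⟩ : ∃ p ps, pvSplit c xs = p :: ps := by
      cases h : pvSplit c xs with
      | nil => exact absurd h (pvSplit_ne_nil c xs)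
      | cons p ps => exact ⟨p, ps, rfl⟩
    by_cases hx : x = c
    · subst hx
      simp only [pvSplit, hps, if_true]
      rw [PySem.Chars.join_cons_cons]
      rw [hps] at ih
      simp [ih]
    · simp only [pvSplit, if_neg hx, hps]
      cases ps with
      | nil =>
        rw [PySem.Chars.join_singleton]
        rw [hps, PySem.Chars.join_singleton] at ih
        simp [ih]
      | cons q qs =>
        rw [PySem.Chars.join_cons_cons]
        rw [hps, PySem.Chars.join_cons_cons] at ih
        simp only [List.cons_append]
        rw [ih]

lemma not_mem_pvSplit (c : Char) (s : List Char) :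
    ∀ p ∈ pvSplit c s, c ∉ p := by
  induction s with
  | nil =>
    intro p hp
    simp [pvSplit] at hp
    simp [hp]
  | cons x xs ih =>
    obtain ⟨q, qs, hqs⟩ : ∃ q qs, pvSplit c xs = q :: qs := by
      cases h : pvSplit c xs with
      | nil => exact absurd h (pvSplit_ne_nil c xs)
      | cons q qs => exact ⟨q, qs, rfl⟩
    intro p hp
    by_cases hx : x = c
    · subst hx
      simp only [pvSplit, if_true] at hp
      rcases List.mem_cons.mp hp with h | h
      · simp [h]
      · exact ih p h
    · simp only [pvSplit, if_neg hx, hqs] at hp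
      rcases List.mem_cons.mp hp with h | h
      · subst h
        intro hc
        rcases List.mem_cons.mp hc with h | h
        · exact hx h.symm
        · exact ih q (by rw [hqs]; exact List.mem_cons_self) h
      · exact ih p (by rw [hqs]; exact List.mem_cons_of_mem q h)

-- the suffix of the path made of parts j..end, joined with '/'
def pvTail (c : Char) (P : List (List Char)) (j : Nat) : List Char :=
  PySem.Chars.join [c] (P.drop j)

lemma pvTail_step (c : Char) (P : List (List Char)) (j : Nat) (hj : j + 1 < P.length) :
    pvTail c P j = P[j] ++ c :: pvTail c P (j + 1) := by
  unfold pvTail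
  obtain ⟨q, qs, hqs⟩ : ∃ q qs, P.drop (j + 1) = q :: qs := by
    cases h : P.drop (j + 1) with
    | nil =>
      have := List.length_drop (l := P) (i := j + 1)
      rw [h] at this
      simp at this
      omega
    | cons q qs => exact ⟨q, qs, rfl⟩
  rw [List.drop_eq_getElem_cons (show j < P.length from by omega), hqs,
    PySem.Chars.join_cons_cons]
  simp

lemma pvTail_last (c : Char) (P : List (List Char)) (hP : P ≠ []) :
    pvTail c P (P.length - 1) = P.getLast hP := by
  unfold pvTail
  have hlen : 0 < P.length := List.length_pos_of_ne_nil hP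
  have hdrop : P.drop (P.length - 1) = [P.getLast hP] := by
    rw [List.drop_eq_getElem_cons (by omega : P.length - 1 < P.length)]
    rw [List.getLast_eq_getElem hP]
    have : P.length - 1 + 1 = P.length := by omega
    rw [this, List.drop_length]
  rw [hdrop, PySem.Chars.join_singleton]

lemma pvTail_len_mono (c : Char) (P : List (List Char)) (j k : Nat) (hjk : j ≤ k)
    (hk : k < P.length) : (pvTail c P k).length ≤ (pvTail c P j).length := by
  induction k with
  | zero =>
    have : j = 0 := Nat.le_zero.mp hjk
    simp [this]
  | succ k ih =>
    by_cases hjk' : j = k + 1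
    · simp [hjk']
    · have hj : j ≤ k := by omega
      have hk' : k + 1 < P.length := hk
      calc (pvTail c P (k + 1)).length
          ≤ (pvTail c P k).length := by
            rw [pvTail_step c P k hk']
            simp
            omega
      _ ≤ (pvTail c P j).length := ih hj (by omega)

lemma mem_pvTail_of_lt (c : Char) (P : List (List Char)) (j : Nat) (hj : j + 1 < P.length) :
    c ∈ pvTail c P j := by
  rw [pvTail_step c P j hj]
  simp

lemma not_mem_pvTail_last (c : Char) (P : List (List Char)) (hP : P ≠ [])
    (hfree : ∀ p ∈ P, c ∉ p) : c ∉ pvTail c P (P.length - 1) := by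
  rw [pvTail_last c P hP]
  exact hfree _ (List.getLast_mem hP)

lemma find_singleton (c : Char) (u v : List Char) (hu : c ∉ u) :
    PySem.Chars.find (u ++ c :: v) [c] = (u.length : Int) := by
  have hinf : [c] <:+: u ++ c :: v := by
    rw [List.singleton_infix_iff]
    simp
  have h0 : 0 ≤ PySem.Chars.find (u ++ c :: v) [c] :=
    (PySem.Chars.find_nonneg_iff _ _).mpr hinf
  obtain ⟨hpre, hmin⟩ := PySem.Chars.find_spec h0
  have hat : (u ++ c :: v)[(PySem.Chars.find (u ++ c :: v) [c]).toNat]? = some c := by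
    obtain ⟨t, ht⟩ := hpre
    rw [← List.head?_drop, ← ht]
    simp
  have hne : (PySem.Chars.find (u ++ c :: v) [c]).toNat = u.length := by
    by_contra hne
    rcases Nat.lt_or_ge (PySem.Chars.find (u ++ c :: v) [c]).toNat u.length with hlt | hge
    · -- the found index would point into u, but c ∉ u
      rw [List.getElem?_append_left hlt] at hat
      exact hu (List.mem_of_getElem? hat)
    · -- u.length is an earlier occurrence, contradicting minimality
      have hlt' : u.length < (PySem.Chars.find (u ++ c :: v) [c]).toNat := by omega
      exact hmin u.length hlt' (by rw [List.drop_left]; exact ⟨v, rfl⟩)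
  omega

-- B's loop is done on the last tail (the bare filename): no '/' remains
lemma fmtB_last (P : List (List Char)) (max_length : Int) (hP : P ≠ [])
    (hfree : ∀ p ∈ P, '/' ∉ p) :
    fmtB_drop max_length (pvTail '/' P (P.length - 1)) = pvTail '/' P (P.length - 1) := by
  rw [fmtB_drop, dif_neg]
  rintro ⟨h1, -⟩
  rw [PySem.Chars.isIn_iff_infix, List.singleton_infix_iff] at h1
  exact not_mem_pvTail_last '/' P hP hfree h1

-- one iteration of B's while loop, on a tail of the path
lemma fmtB_step (P : List (List Char)) (max_length : Int) (j : Nat)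
    (hfree : ∀ p ∈ P, '/' ∉ p) (hj : j + 1 < P.length) :
    fmtB_drop max_length (pvTail '/' P j) =
      if max_length < 3 + ((pvTail '/' P j).length : Int) then
        fmtB_drop max_length (pvTail '/' P (j + 1))
      else pvTail '/' P j := by
  have hu : '/' ∉ P[j] := hfree _ (List.getElem_mem _)
  have hw := pvTail_step '/' P j hj
  have hIn : PySem.Chars.isIn ['/'] (pvTail '/' P j) = true := by
    rw [PySem.Chars.isIn_iff_infix, List.singleton_infix_iff]
    exact mem_pvTail_of_lt '/' P j hj
  have hfind : PySem.Chars.find (pvTail '/' P j) ['/'] = (P[j].length : Int) := by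
    rw [hw]
    exact find_singleton '/' P[j] _ hu
  have hlen : PySem.Chars.len (['.', '.', '.'] ++ pvTail '/' P j) =
      3 + ((pvTail '/' P j).length : Int) := by
    simp [PySem.Chars.len]
    ring
  rw [fmtB_drop]
  by_cases hc : max_length < 3 + ((pvTail '/' P j).length : Int)
  · rw [dif_pos ⟨hIn, by rw [hlen]; exact hc⟩, if_pos hc]
    congr 1
    rw [hfind, PySem.List.slice_from _ (by omega)]
    have ht : ((P[j].length : Int) + 1).toNat = P[j].length + 1 := by omega
    rw [ht, hw]
    rw [show P[j] ++ '/' :: pvTail '/' P (j + 1) = (P[j] ++ ['/']) ++ pvTail '/' P (j + 1) by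
      simp]
    rw [show P[j].length + 1 = (P[j] ++ ['/']).length by simp]
    exact List.drop_left
  · rw [dif_neg, if_neg hc]
    rintro ⟨-, h2⟩
    rw [hlen] at h2
    exact hc h2

-- B's loop run to the end: it stops at the first fitting tail (or at the bare filename)
lemma fmtB_run (P : List (List Char)) (max_length : Int) (hP : P ≠ [])
    (hfree : ∀ p ∈ P, '/' ∉ p) :
    ∀ (d j : Nat), j ≤ P.length - 1 → P.length - 1 - j ≤ d →
      ∃ k, j ≤ k ∧ k ≤ P.length - 1 ∧
        fmtB_drop max_length (pvTail '/' P j) = pvTail '/' P k ∧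
        (k = P.length - 1 ∨ 3 + ((pvTail '/' P k).length : Int) ≤ max_length) ∧
        (∀ i, j ≤ i → i < k → max_length < 3 + ((pvTail '/' P i).length : Int)) := by
  intro d
  induction d with
  | zero =>
    intro j hj hd
    have hjL : j = P.length - 1 := by omega
    subst hjL
    exact ⟨P.length - 1, le_refl _, le_refl _, fmtB_last P max_length hP hfree, Or.inl rfl,
      fun i hi1 hi2 => by omega⟩
  | succ d ih =>
    intro j hj hd
    by_cases hjL : j = P.length - 1
    · subst hjL
      exact ⟨P.length - 1, le_refl _, le_refl _, fmtB_last P max_length hP hfree, Or.inl rfl,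
        fun i hi1 hi2 => by omega⟩
    · have hlen1 : 0 < P.length := List.length_pos_of_ne_nil hP
      have hj1 : j + 1 < P.length := by omega
      rw [fmtB_step P max_length j hfree hj1]
      by_cases hc : max_length < 3 + ((pvTail '/' P j).length : Int)
      · rw [if_pos hc]
        obtain ⟨k, hk1, hk2, hk3, hk4, hk5⟩ := ih (j + 1) (by omega) (by omega)
        refine ⟨k, by omega, hk2, hk3, hk4, fun i hi1 hi2 => ?_⟩
        rcases Nat.eq_or_lt_of_le hi1 with h | h
        · rw [← h]
          exact hc
        · exact hk5 i (by omega) hi2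
      · rw [if_neg hc]
        exact ⟨j, le_refl _, hj, rfl, Or.inr (by omega), fun i hi1 hi2 => by omega⟩

-- A's loop, descending with every tail above the counter known to fit, equals '...' ++ B's loop
lemma fmtA_eq_fmtB (P : List (List Char)) (max_length : Int) (hP : P ≠ [])
    (hfree : ∀ p ∈ P, '/' ∉ p)
    (hfit0 : max_length < 3 + ((pvTail '/' P 0).length : Int)) :
    ∀ (cnt : Nat), 1 ≤ cnt → cnt ≤ P.length - 1 →
      (∀ k, cnt ≤ k → k < P.length - 1 → 3 + ((pvTail '/' P k).length : Int) ≤ max_length) →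
      fmtA_loop P max_length cnt (pvTail '/' P cnt) =
        ['.', '.', '.'] ++ fmtB_drop max_length (pvTail '/' P 0) := by
  intro cnt
  induction cnt with
  | zero => intro h1; omega
  | succ n ih =>
    intro _ hcnt hup
    have hlen1 : 0 < P.length := List.length_pos_of_ne_nil hP
    have hn1 : n + 1 < P.length := by omega
    have hstep := pvTail_step '/' P n hn1
    have hpart : PySem.List.pyGetD P (n : Int) [] = P[n] := by
      rw [PySem.List.pyGetD_natCast]
      exact List.getD_eq_getElem P [] (by omega)
    rw [fmtA_loop]
    simp only [hpart]
    have hcond : PySem.Chars.len (['.', '.', '.'] ++ P[n] ++ ['/'] ++ pvTail '/' P (n + 1)) =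
        3 + ((pvTail '/' P n).length : Int) := by
      rw [hstep]
      simp [PySem.Chars.len]
      ring
    rw [hcond]
    by_cases hc : 3 + ((pvTail '/' P n).length : Int) ≤ max_length
    · rw [if_pos hc]
      have hn0 : 1 ≤ n := by
        rcases Nat.eq_zero_or_pos n with h | h
        · subst h
          omega
        · exact h
      have harg : P[n] ++ ['/'] ++ pvTail '/' P (n + 1) = pvTail '/' P n := by
        rw [hstep]
        simp
      rw [harg]
      refine ih hn0 (by omega) (fun k hk1 hk2 => ?_)
      rcases Nat.eq_or_lt_of_le hk1 with h | h
      · rw [← h]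
        exact hc
      · exact hup k (by omega) hk2
    · rw [if_neg hc]
      obtain ⟨k, hk1, hk2, hk3, hk4, hk5⟩ :=
        fmtB_run P max_length hP hfree (P.length) 0 (by omega) (by omega)
      have hnotfit : ∀ i, i ≤ n → max_length < 3 + ((pvTail '/' P i).length : Int) := by
        intro i hi
        have hmono := pvTail_len_mono '/' P i n hi (by omega)
        omega
      have hkn : k = n + 1 := by
        rcases Nat.lt_or_ge k (n + 1) with hlt | hge
        · exfalso
          rcases hk4 with h | h
          · omega
          · exact absurd h (by have := hnotfit k (by omega); omega)
        · rcases Nat.eq_or_lt_of_le hge with h | h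
          · omega
          · exfalso
            have hfitn1 : 3 + ((pvTail '/' P (n + 1)).length : Int) ≤ max_length := by
              rcases Nat.lt_or_ge (n + 1) (P.length - 1) with h' | h'
              · exact hup (n + 1) (le_refl _) h'
              · omega
            have := hk5 (n + 1) (by omega) h
            omega
      rw [hk3, hkn]

-- ===== VERDICT (by name: the statement is the Claim_ definition above) =====
theorem format_file_path_for_display_spec : Claim_equal_format_file_path_for_display := by
  intro file_path max_length _
  unfold Spec_format_file_path_for_display
  unfold format_file_path_for_display format_file_path_for_display_alt
  by_cases h1 : PySem.Str.len file_path ≤ max_length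
  · rw [if_pos h1, if_pos h1]
  · rw [if_neg h1, if_neg h1]
    have hbig : max_length < (file_path.toList.length : Int) := by
      have hl : file_path.toList.length = file_path.length := by
        simp
      simp [PySem.Str.len] at h1
      omega
    have hsplit : PySem.Chars.splitOn file_path.toList ['/'] = pvSplit '/' file_path.toList :=
      splitOn_eq_pvSplit '/' file_path.toList
    set s := file_path.toList with hs
    set P := pvSplit '/' s with hPdef
    have hP : P ≠ [] := pvSplit_ne_nil '/' s
    have hlen1 : 0 < P.length := List.length_pos_of_ne_nil hP
    have hfree : ∀ p ∈ P, '/' ∉ p := not_mem_pvSplit '/' s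
    have hjoin : pvTail '/' P 0 = s := by
      exact join_pvSplit '/' s
    have hfile : (PySem.List.pyGet? P (-1)).getD [] = pvTail '/' P (P.length - 1) := by
      rw [PySem.List.pyGet?_neg_one, List.getLast?_eq_some_getLast hP, Option.getD_some,
        pvTail_last '/' P hP]
    obtain ⟨k, hk1, hk2, hk3, hk4, hk5⟩ :=
      fmtB_run P max_length hP hfree (P.length) 0 (by omega) (by omega)
    rw [hjoin] at hk3
    simp only [hsplit, hfile, hk3]
    have hlenfile : PySem.Chars.len (pvTail '/' P (P.length - 1)) =
        ((pvTail '/' P (P.length - 1)).length : Int) := by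
      simp [PySem.Chars.len]
    by_cases hf : max_length < ((pvTail '/' P (P.length - 1)).length : Int)
    · -- the bare filename is already too long: both return it unadorned
      have hkL : k = P.length - 1 := by
        rcases hk4 with h | h
        · exact h
        · exfalso
          have hmono := pvTail_len_mono '/' P k (P.length - 1) hk2 (by omega)
          omega
      rw [hlenfile, if_pos hf, hkL]
      rw [if_pos (by simp [PySem.Chars.len]; omega)]
    · -- the filename fits: A's regrown suffix equals '...' ++ B's shrunk remainder
      have hL1 : 1 ≤ P.length - 1 := by
        rcases Nat.eq_zero_or_pos (P.length - 1) with h | h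
        · exfalso
          have : pvTail '/' P (P.length - 1) = s := by
            rw [h] at *
            exact hjoin
          rw [this] at hf
          exact hf (by omega)
        · exact h
      have hfit0 : max_length < 3 + ((pvTail '/' P 0).length : Int) := by
        rw [hjoin]
        omega
      have hrlen : ((pvTail '/' P k).length : Int) ≤ max_length := by
        rcases hk4 with h | h
        · rw [h]
          omega
        · omega
      rw [hlenfile, if_neg hf]
      rw [if_neg (by simp [PySem.Chars.len]; omega)]
      congr 1
      have := fmtA_eq_fmtB P max_length hP hfree hfit0 (P.length - 1) hL1 (le_refl _)
        (fun k hk1 hk2 => by omega)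
      rw [this, hjoin, hk3]
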